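-- pv_equiv track=rewrite | github.com/roomcard/s | hard/single/code.py | find_closest_clusters
-- ===== SOURCE A (Python) =====
-- def find_closest_clusters(distMat):
--
--     n = len(distMat)
--     min_dist = float('inf')
--     closest_pair = (0, 0)
--
--     for i in range(1, n):
--         for j in range(i):
--             if distMat[i][j] < min_dist:
--                 min_dist = distMat[i][j]
--                 closest_pair = (i, j)
--
--     return closest_pair
-- ===== SOURCE B (Python) =====
-- def find_closest_clusters(distMat):
--     n = len(distMat)
--     # Phase 1: one summary (i, row_min, row_argmin) per row i >= 1,
--     # scanning only the lower-triangle part j < i; strict '<' keeps the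
--     # first occurrence of each row's minimum.
--     summaries = []
--     for i in range(1, n):
--         row_min = None
--         row_arg = 0
--         for j in range(i):
--             v = distMat[i][j]
--             if row_min is None or v < row_min:
--                 row_min = v
--                 row_arg = j
--         summaries.append((i, row_min, row_arg))
--     # Phase 2: combine the row summaries, strict '<' keeps the earliest row.
--     best = None
--     pair = (0, 0)
--     for (i, m, j) in summaries:
--         if m is not None and (best is None or m < best):
--             best = m
--             pair = (i, j)
--     return pair
-- ===== Notes on version B (the rewrite author's own statement) =====
-- stated objective: alternative
-- what changed: Replaced the single nested scan carrying one global (min,pair) state by a two-phase decomposition: phase 1 builds a per-row summary list (row index, row minimum, first argmin), phase 2 folds those summaries keeping the first strictly smaller row; same O(n^2) cost.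
import Mathlib
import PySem

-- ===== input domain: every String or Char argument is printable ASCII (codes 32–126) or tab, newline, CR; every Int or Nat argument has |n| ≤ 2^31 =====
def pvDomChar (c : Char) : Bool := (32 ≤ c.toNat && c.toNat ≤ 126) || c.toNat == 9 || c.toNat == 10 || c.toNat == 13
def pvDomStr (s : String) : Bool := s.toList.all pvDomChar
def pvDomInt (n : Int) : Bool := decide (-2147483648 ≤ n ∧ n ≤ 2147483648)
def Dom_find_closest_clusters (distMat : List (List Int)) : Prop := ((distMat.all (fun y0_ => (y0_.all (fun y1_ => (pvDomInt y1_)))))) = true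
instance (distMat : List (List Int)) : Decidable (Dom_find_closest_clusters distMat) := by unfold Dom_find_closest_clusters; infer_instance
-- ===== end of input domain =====

-- B replaces A's single nested scan with a two-phase decomposition (per-row
-- summaries, then a fold over the summaries); same O(n^2) cost (objective: alternative).

-- distMat[i][j]; total stand-in: Pre_ guarantees every access is in range
-- (Python raises IndexError exactly on the inputs Pre_ excludes).
def pvVal (distMat : List (List Int)) (i j : Int) : Int :=
  ((PySem.List.pyGet? ((PySem.List.pyGet? distMat i).getD []) j).getD 0)

-- Python's 'v < m' where m starts as float('inf'): none plays inf, always greater.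
def pvOptLt (v : Int) (m : Option Int) : Bool :=
  match m with
  | none => true
  | some x => decide (v < x)

-- ===== PORT A =====
-- body of A's inner loop: update (min_dist, closest_pair)
def pvAStep (distMat : List (List Int)) (i : Int) (st : Option Int × (Int × Int)) (j : Int) :
    Option Int × (Int × Int) :=
  if pvOptLt (pvVal distMat i j) st.1 then (some (pvVal distMat i j), (i, j)) else st

def find_closest_clusters (distMat : List (List Int)) : Int × Int :=
  ((PySem.List.pyRange 1 distMat.length 1).foldl
    (fun st i => (PySem.List.pyRange 0 i 1).foldl (pvAStep distMat i) st)
    ((none : Option Int), ((0 : Int), (0 : Int)))).2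

-- ===== PORT B =====
-- phase-1 inner step: update (row_min, row_arg)
def pvBStep (distMat : List (List Int)) (i : Int) (s : Option Int × Int) (j : Int) :
    Option Int × Int :=
  if pvOptLt (pvVal distMat i j) s.1 then (some (pvVal distMat i j), j) else s

-- phase-1 row summary (i, row_min, row_arg)
def pvRowScan (distMat : List (List Int)) (i : Int) : Int × (Option Int × Int) :=
  (i, (PySem.List.pyRange 0 i 1).foldl (pvBStep distMat i) ((none : Option Int), (0 : Int)))

-- phase-2 step: keep the first strictly smaller row summary
def pvBCombine (st : Option Int × (Int × Int)) (s : Int × (Option Int × Int)) :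
    Option Int × (Int × Int) :=
  if s.2.1.isSome && pvOptLt (s.2.1.getD 0) st.1 then (s.2.1, (s.1, s.2.2)) else st

def find_closest_clusters_alt (distMat : List (List Int)) : Int × Int :=
  (((PySem.List.pyRange 1 distMat.length 1).map (pvRowScan distMat)).foldl
    pvBCombine ((none : Option Int), ((0 : Int), (0 : Int)))).2

-- ===== PRECONDITION & SPEC =====
-- Pre_ excludes ragged matrices whose row i is shorter than i: there the
-- Python A (and B) raises IndexError on distMat[i][j].
def Pre_find_closest_clusters (distMat : List (List Int)) : Prop :=
  ∀ i ∈ List.range distMat.length, i ≤ (distMat.getD i []).length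
instance (distMat : List (List Int)) : Decidable (Pre_find_closest_clusters distMat) := by
  unfold Pre_find_closest_clusters; infer_instance

def pvWitness_find_closest_clusters : List (List Int) := [[0], [3, 1], [2, 5, 0]]

def Spec_find_closest_clusters (distMat : List (List Int)) (out : Int × Int) : Prop :=
  out = find_closest_clusters_alt distMat
instance (distMat : List (List Int)) (out : Int × Int) :
    Decidable (Spec_find_closest_clusters distMat out) := by
  unfold Spec_find_closest_clusters; infer_instance

-- ===== CLAIM (what is proved, stated in full; the proofs are below) =====
def Claim_equal_find_closest_clusters : Prop :=
  ∀ (distMat : List (List Int)), Dom_find_closest_clusters distMat →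
    Pre_find_closest_clusters distMat →
    Spec_find_closest_clusters distMat (find_closest_clusters distMat)

-- ===== LEMMAS AND PROOFS =====

-- A's inner-loop step commutes with combining a row summary into the global state.
lemma pvStep_comm (d : List (List Int)) (i : Int) (st : Option Int × (Int × Int))
    (s : Option Int × Int) (j : Int) :
    pvAStep d i (pvBCombine st (i, s)) j = pvBCombine st (i, pvBStep d i s j) := by
  rcases st with ⟨m, p⟩
  rcases s with ⟨rm, ra⟩
  rcases rm with _ | x <;> rcases m with _ | y <;>
    simp only [pvAStep, pvBStep, pvBCombine, pvOptLt, Option.isSome, Option.getD,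
      Bool.and_true, Bool.true_and, Bool.false_and] <;>
    split_ifs <;> simp_all <;> omega

-- Folding A's inner step from a combined state equals combining the row-scan result.
lemma pvInner (d : List (List Int)) (i : Int) (js : List Int) :
    ∀ st s, js.foldl (pvAStep d i) (pvBCombine st (i, s))
      = pvBCombine st (i, js.foldl (pvBStep d i) s) := by
  induction js with
  | nil => intro st s; rfl
  | cons j js ih =>
    intro st s
    simp only [List.foldl_cons, pvStep_comm]
    exact ih st (pvBStep d i s j)

lemma pvCombine_init (st : Option Int × (Int × Int)) (i : Int) :
    pvBCombine st (i, ((none : Option Int), (0 : Int))) = st := by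
  simp [pvBCombine]

-- one row of A = phase 2 applied to that row's summary
lemma pvRow (d : List (List Int)) (i : Int) (st : Option Int × (Int × Int)) :
    (PySem.List.pyRange 0 i 1).foldl (pvAStep d i) st = pvBCombine st (pvRowScan d i) := by
  have h := pvInner d i (PySem.List.pyRange 0 i 1) st ((none : Option Int), (0 : Int))
  rw [pvCombine_init] at h
  exact h

-- ===== VERDICT (by name: the statement is the Claim_ definition above) =====
theorem find_closest_clusters_spec : Claim_equal_find_closest_clusters := by
  intro d _ _
  unfold Spec_find_closest_clusters find_closest_clusters find_closest_clusters_alt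
  rw [List.foldl_map]
  have hf : (fun (st : Option Int × (Int × Int)) (i : Int) =>
        (PySem.List.pyRange 0 i 1).foldl (pvAStep d i) st)
      = fun st i => pvBCombine st (pvRowScan d i) :=
    funext fun st => funext fun i => pvRow d i st
  rw [hf]
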